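-- pv_equiv track=rewrite | github.com/TARMAH/HACKER-RANK | Interview Preparation Kit/Search/Triple sum.py | triplets
-- ===== SOURCE A (Python) =====
-- def triplets(a, b, c):
--
--     a = set(a)
--     b = set(b)
--     c = set(c)
--
--     a = sorted(a)
--     b = sorted(b)
--     c = sorted(c)
--
--     total = 0
--     length_of_a = len(a)
--     length_of_c = len(c)
--     ia = 0
--     ic = 0
--     ta = 0
--     tc = 0
--
--     for element in b:
--
--         while ia<length_of_a and a[ia] <= element:
--             ia += 1
--             ta += 1
--
--         while ic<length_of_c and c[ic] <= element:
--
--             ic += 1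
--             tc += 1
--
--         total += (ta * tc )
--
--     return total
-- ===== SOURCE B (Python) =====
-- def triplets(a, b, c):
--     sa = sorted(set(a))
--     sc = sorted(set(c))
--
--     def count_le(xs, v):
--         # rightmost insertion point: number of elements <= v in sorted xs
--         lo, hi = 0, len(xs)
--         while lo < hi:
--             mid = (lo + hi) // 2
--             if xs[mid] <= v:
--                 lo = mid + 1
--             else:
--                 hi = mid
--         return lo
--
--     total = 0
--     for v in sorted(set(b)):
--         total += count_le(sa, v) * count_le(sc, v)
--     return total
-- ===== Notes on version B (the rewrite author's own statement) =====
-- stated objective: alternative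
-- what changed: Replaces A's stateful two-pointer sweep (shared running indices ia/ic advanced across b's iterations) with an independent hand-written binary search per b-value that counts elements <= v in each sorted deduped list, multiplying the two counts.
import Mathlib
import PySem

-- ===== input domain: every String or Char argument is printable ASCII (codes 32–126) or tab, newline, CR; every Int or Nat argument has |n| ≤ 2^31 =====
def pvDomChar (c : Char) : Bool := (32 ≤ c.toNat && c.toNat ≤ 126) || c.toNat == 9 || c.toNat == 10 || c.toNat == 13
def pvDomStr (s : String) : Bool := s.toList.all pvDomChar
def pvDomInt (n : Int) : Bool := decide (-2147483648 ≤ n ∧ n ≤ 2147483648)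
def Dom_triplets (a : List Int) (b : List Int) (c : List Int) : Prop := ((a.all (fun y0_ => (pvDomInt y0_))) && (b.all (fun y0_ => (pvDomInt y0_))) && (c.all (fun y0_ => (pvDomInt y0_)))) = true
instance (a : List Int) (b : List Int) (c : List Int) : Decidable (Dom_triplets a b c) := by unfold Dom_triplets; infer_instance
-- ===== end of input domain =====

-- B replaces A's coordinated two-pointer sweep with an independent binary search per b-value
-- (count of elements ≤ v in each sorted deduped list); same cost class, different traversal.

-- ===== PORT A =====
-- the inner `while i<len and xs[i] <= element: i += 1; t += 1` loop (shared for a/c)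
def pvAdv (xs : List Int) (v : Int) (i t : Nat) : Nat × Nat :=
  if i < xs.length ∧ xs.getD i 0 ≤ v then pvAdv xs v (i + 1) (t + 1) else (i, t)
termination_by xs.length - i
decreasing_by omega

-- the `for element in b:` loop carrying (ia, ta, ic, tc, total)
def pvLoopA (a c : List Int) (b : List Int) (ia ta ic tc : Nat) (total : Int) : Int :=
  match b with
  | [] => total
  | e :: rest =>
    let pa := pvAdv a e ia ta
    let pc := pvAdv c e ic tc
    pvLoopA a c rest pa.1 pa.2 pc.1 pc.2 (total + (pa.2 : Int) * (pc.2 : Int))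

def triplets (a : List Int) (b : List Int) (c : List Int) : Int :=
  let sa := PySem.List.sorted (PySem.Set.ofList a) (fun x => x)
  let sb := PySem.List.sorted (PySem.Set.ofList b) (fun x => x)
  let sc := PySem.List.sorted (PySem.Set.ofList c) (fun x => x)
  pvLoopA sa sc sb 0 0 0 0 0

-- ===== PORT B =====
-- Source B's hand-written `count_le` binary-search loop on (lo, hi)
def pvBis (xs : List Int) (v : Int) (lo hi : Nat) : Nat :=
  if lo < hi then
    let mid := (lo + hi) / 2
    if xs.getD mid 0 ≤ v then pvBis xs v (mid + 1) hi else pvBis xs v lo mid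
  else lo
termination_by hi - lo
decreasing_by all_goals omega

def pvCountLe (xs : List Int) (v : Int) : Nat := pvBis xs v 0 xs.length

def triplets_alt (a : List Int) (b : List Int) (c : List Int) : Int :=
  let sa := PySem.List.sorted (PySem.Set.ofList a) (fun x => x)
  let sc := PySem.List.sorted (PySem.Set.ofList c) (fun x => x)
  (PySem.List.sorted (PySem.Set.ofList b) (fun x => x)).foldl
    (fun total v => total + (pvCountLe sa v : Int) * (pvCountLe sc v : Int)) 0

-- ===== PRECONDITION & SPEC =====
def Spec_triplets (a : List Int) (b : List Int) (c : List Int) (out : Int) : Prop := out = triplets_alt a b c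
instance (a : List Int) (b : List Int) (c : List Int) (out : Int) : Decidable (Spec_triplets a b c out) := by unfold Spec_triplets; infer_instance

-- ===== CLAIM (what is proved, stated in full; the proofs are below) =====
def Claim_equal_triplets : Prop := ∀ (a : List Int) (b : List Int) (c : List Int), Dom_triplets a b c → Spec_triplets a b c (triplets a b c)

-- ===== LEMMAS AND PROOFS =====

-- number of elements ≤ v in a ≤-sorted list, as a prefix length
def pvCnt (v : Int) : List Int → Nat
  | [] => 0
  | x :: xs => if x ≤ v then pvCnt v xs + 1 else 0

theorem pvCnt_le_length (v : Int) (xs : List Int) : pvCnt v xs ≤ xs.length := by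
  induction xs with
  | nil => simp [pvCnt]
  | cons x xs ih => simp only [pvCnt, List.length_cons]; split <;> omega

theorem pvCnt_mono (u v : Int) (huv : u ≤ v) (xs : List Int) : pvCnt u xs ≤ pvCnt v xs := by
  induction xs with
  | nil => simp [pvCnt]
  | cons x xs ih =>
    simp only [pvCnt]
    by_cases h : x ≤ u
    · rw [if_pos h, if_pos (le_trans h huv)]; omega
    · rw [if_neg h]; omega

theorem pvCnt_char (v : Int) (xs : List Int) (hs : xs.Pairwise (· ≤ ·)) :
    ∀ i, i < xs.length → (xs.getD i 0 ≤ v ↔ i < pvCnt v xs) := by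
  induction xs with
  | nil => intro i hi; simp at hi
  | cons x xs ih =>
    rcases List.pairwise_cons.mp hs with ⟨hx, hxs⟩
    intro i hi
    cases i with
    | zero =>
      simp only [List.getD_cons_zero, pvCnt]
      constructor
      · intro h; rw [if_pos h]; omega
      · intro h
        by_contra hc
        rw [if_neg hc] at h; omega
    | succ j =>
      simp only [List.getD_cons_succ, pvCnt]
      simp only [List.length_cons] at hi
      by_cases h : x ≤ v
      · rw [if_pos h]
        rw [ih hxs j (by omega)]
        omega
      · rw [if_neg h]
        constructor
        · intro hle
          exfalso
          have hmem : xs.getD j 0 ∈ xs := by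
            rw [List.getD_eq_getElem _ _ (by omega)]
            exact List.getElem_mem _
          have := hx _ hmem
          omega
        · omega

theorem pvBis_eq (v : Int) (xs : List Int) (hs : xs.Pairwise (· ≤ ·)) :
    ∀ n lo hi, hi - lo ≤ n → lo ≤ pvCnt v xs → pvCnt v xs ≤ hi → hi ≤ xs.length →
      pvBis xs v lo hi = pvCnt v xs := by
  intro n
  induction n with
  | zero =>
    intro lo hi h1 h2 h3 h4
    rw [pvBis, if_neg (by omega)]
    omega
  | succ n ih =>
    intro lo hi h1 h2 h3 h4
    rw [pvBis]
    by_cases hlt : lo < hi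
    · rw [if_pos hlt]
      have hmid : (lo + hi) / 2 < xs.length := by omega
      have hc := pvCnt_char v xs hs ((lo + hi) / 2) hmid
      by_cases hg : xs.getD ((lo + hi) / 2) 0 ≤ v
      · rw [if_pos hg]
        have := hc.mp hg
        exact ih _ hi (by omega) (by omega) h3 h4
      · rw [if_neg hg]
        have : ¬ ((lo + hi) / 2 < pvCnt v xs) := fun h => hg (hc.mpr h)
        exact ih lo _ (by omega) h2 (by omega) (by omega)
    · rw [if_neg hlt]; omega

theorem pvCountLe_eq (v : Int) (xs : List Int) (hs : xs.Pairwise (· ≤ ·)) :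
    pvCountLe xs v = pvCnt v xs :=
  pvBis_eq v xs hs xs.length 0 xs.length (by omega) (by omega) (pvCnt_le_length v xs) le_rfl

theorem pvAdv_eq (v : Int) (xs : List Int) (hs : xs.Pairwise (· ≤ ·)) :
    ∀ n i t, pvCnt v xs - i ≤ n → i ≤ pvCnt v xs →
      pvAdv xs v i t = (pvCnt v xs, t + (pvCnt v xs - i)) := by
  intro n
  induction n with
  | zero =>
    intro i t h1 h2
    have hieq : i = pvCnt v xs := by omega
    rw [pvAdv]
    have hcond : ¬ (i < xs.length ∧ xs.getD i 0 ≤ v) := by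
      rintro ⟨hl, hg⟩
      have := (pvCnt_char v xs hs i hl).mp hg
      omega
    rw [if_neg hcond]
    simp [hieq]
  | succ n ih =>
    intro i t h1 h2
    by_cases heq : i = pvCnt v xs
    · rw [pvAdv]
      have hcond : ¬ (i < xs.length ∧ xs.getD i 0 ≤ v) := by
        rintro ⟨hl, hg⟩
        have := (pvCnt_char v xs hs i hl).mp hg
        omega
      rw [if_neg hcond]
      simp [heq]
    · have hlt : i < pvCnt v xs := by omega
      have hil : i < xs.length := by
        have := pvCnt_le_length v xs; omega
      rw [pvAdv, if_pos ⟨hil, (pvCnt_char v xs hs i hil).mpr hlt⟩]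
      rw [ih (i + 1) (t + 1) (by omega) (by omega)]
      refine Prod.ext rfl ?_
      simp only []
      omega

theorem pvLoopA_eq (a c : List Int) (ha : a.Pairwise (· ≤ ·)) (hc : c.Pairwise (· ≤ ·)) :
    ∀ b, b.Pairwise (· ≤ ·) →
    ∀ ia ic total, (∀ e ∈ b, ia ≤ pvCnt e a ∧ ic ≤ pvCnt e c) →
      pvLoopA a c b ia ia ic ic total =
        total + (b.map (fun e => (pvCnt e a : Int) * (pvCnt e c : Int))).sum := by
  intro b
  induction b with
  | nil => intro _ ia ic total _; simp [pvLoopA]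
  | cons e rest ih =>
    intro hb ia ic total hinv
    rcases List.pairwise_cons.mp hb with ⟨he, hrest⟩
    obtain ⟨hia, hic⟩ := hinv e (List.mem_cons_self)
    have hadva : pvAdv a e ia ia = (pvCnt e a, pvCnt e a) := by
      rw [pvAdv_eq e a ha (pvCnt e a - ia) ia ia le_rfl hia]
      refine Prod.ext rfl ?_
      simp only []
      omega
    have hadvc : pvAdv c e ic ic = (pvCnt e c, pvCnt e c) := by
      rw [pvAdv_eq e c hc (pvCnt e c - ic) ic ic le_rfl hic]
      refine Prod.ext rfl ?_
      simp only []
      omega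
    show pvLoopA a c (e :: rest) ia ia ic ic total = _
    rw [pvLoopA]
    simp only [hadva, hadvc]
    rw [ih hrest (pvCnt e a) (pvCnt e c) _
      (fun e' he' => ⟨pvCnt_mono e e' (he e' he') a, pvCnt_mono e e' (he e' he') c⟩)]
    simp only [List.map_cons, List.sum_cons]
    ring

theorem sorted_set_pairwise_le (xs : List Int) :
    (PySem.List.sorted (PySem.Set.ofList xs) (fun x => x)).Pairwise (· ≤ ·) :=
  (PySem.List.sorted_ofList_pairwise_lt xs).imp (fun h => le_of_lt h)

-- ===== VERDICT (by name: the statement is the Claim_ definition above) =====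
theorem triplets_spec : Claim_equal_triplets := by
  intro a b c _
  unfold Spec_triplets triplets triplets_alt
  have ha := sorted_set_pairwise_le a
  have hb := sorted_set_pairwise_le b
  have hc := sorted_set_pairwise_le c
  rw [pvLoopA_eq _ _ ha hc _ hb 0 0 0 (fun e _ => ⟨Nat.zero_le _, Nat.zero_le _⟩)]
  rw [PySem.List.foldl_add]
  congr 1
  congr 1
  apply List.map_congr_left
  intro e _
  rw [pvCountLe_eq e _ ha, pvCountLe_eq e _ hc]
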